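-- pv_equiv track=rewrite | github.com/maddelena8888/Tamio-V2 | tamio-backend/app/tami/intent.py | get_relevant_knowledge_keys
-- ===== SOURCE A (Python) =====
-- from typing import List, Tuple, Optional, Dict, Any
-- from enum import Enum
--
-- class Intent(str, Enum):
--     """User intent categories for TAMI queries."""
--     # Question types
--     EXPLAIN_FORECAST = "explain_forecast"
--     EXPLAIN_TERM = "explain_term"  # Glossary lookup
--     EXPLAIN_SCENARIO = "explain_scenario"
--     EXPLAIN_RISK = "explain_risk"
--     HOW_TO = "how_to"
--
--     # Action intents
--     CREATE_SCENARIO = "create_scenario"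
--     MODIFY_SCENARIO = "modify_scenario"
--     COMPARE_SCENARIOS = "compare_scenarios"
--     GOAL_PLANNING = "goal_planning"
--
--     # Status queries
--     CHECK_STATUS = "check_status"
--     CHECK_RUNWAY = "check_runway"
--     CHECK_CASH = "check_cash"
--
--     # General
--     GREETING = "greeting"
--     HELP = "help"
--     GENERAL_QUESTION = "general_question"
--
-- def get_relevant_knowledge_keys(intent: Intent, keywords: List[str]) -> Dict[str, List[str]]:
--     """
--     Get relevant knowledge base keys based on intent and keywords.
--
--     Returns dict with keys for each knowledge category to look up.
--     """
--     keys = {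
--         "glossary_terms": [],
--         "scenario_types": [],
--         "best_practice_categories": [],
--         "features": [],
--         "how_to_topics": [],
--         "situations": [],
--     }
--
--     # Map intents to knowledge lookups
--     if intent == Intent.EXPLAIN_TERM:
--         keys["glossary_terms"] = keywords if keywords else []
--
--     elif intent == Intent.HOW_TO:
--         # Map common how-to phrases to topics
--         keyword_str = " ".join(keywords).lower()
--         if "client" in keyword_str or "customer" in keyword_str:
--             keys["how_to_topics"].append("add_client")
--         if "expense" in keyword_str or "cost" in keyword_str:
--             keys["how_to_topics"].append("add_expense")
--         if "scenario" in keyword_str: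
--             keys["how_to_topics"].append("create_scenario")
--         if "forecast" in keyword_str:
--             keys["how_to_topics"].append("interpret_forecast")
--         if "xero" in keyword_str:
--             keys["how_to_topics"].append("connect_xero")
--
--     elif intent == Intent.EXPLAIN_RISK:
--         keys["best_practice_categories"].append("risk_management")
--         keys["features"].append("buffer_rules")
--
--     elif intent in (Intent.CREATE_SCENARIO, Intent.EXPLAIN_SCENARIO):
--         # Map keywords to scenario types
--         keyword_str = " ".join(keywords).lower()
--         if any(w in keyword_str for w in ["client", "customer", "churn", "lose", "loss"]):
--             keys["scenario_types"].append("client_loss")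
--         if any(w in keyword_str for w in ["hire", "staff", "employee", "team"]):
--             keys["scenario_types"].append("new_hire")
--         if any(w in keyword_str for w in ["delay", "late", "payment"]):
--             keys["scenario_types"].append("payment_delay")
--         if any(w in keyword_str for w in ["expense", "cut", "reduce", "cost"]):
--             keys["scenario_types"].append("expense_adjustment")
--
--     elif intent == Intent.GOAL_PLANNING:
--         keys["best_practice_categories"].append("runway_extension")
--         keys["how_to_topics"].append("extend_runway")
--
--     elif intent == Intent.CHECK_RUNWAY:
--         keys["glossary_terms"].extend(["runway", "burn_rate"])
--         keys["features"].append("runway_tracking")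
--
--     elif intent == Intent.CHECK_CASH:
--         keys["glossary_terms"].extend(["cash_position", "opening_balance"])
--         keys["features"].append("cash_tracking")
--
--     elif intent == Intent.HELP:
--         keys["features"].append("tami_assistant")
--         keys["situations"].append("first_time_user")
--
--     return keys
-- ===== SOURCE B (Python) =====
-- # B: replaces the if/elif chain by a configuration table (intent -> list of
-- # (trigger_words, category, values) rules) scanned uniformly; simpler to extend.
--
-- _SCENARIO_RULES = [
--     (("client", "customer", "churn", "lose", "loss"), "scenario_types", ["client_loss"]),
--     (("hire", "staff", "employee", "team"), "scenario_types", ["new_hire"]),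
--     (("delay", "late", "payment"), "scenario_types", ["payment_delay"]),
--     (("expense", "cut", "reduce", "cost"), "scenario_types", ["expense_adjustment"]),
-- ]
--
-- _RULES = {
--     "how_to": [
--         (("client", "customer"), "how_to_topics", ["add_client"]),
--         (("expense", "cost"), "how_to_topics", ["add_expense"]),
--         (("scenario",), "how_to_topics", ["create_scenario"]),
--         (("forecast",), "how_to_topics", ["interpret_forecast"]),
--         (("xero",), "how_to_topics", ["connect_xero"]),
--     ],
--     "explain_risk": [
--         ((), "best_practice_categories", ["risk_management"]),
--         ((), "features", ["buffer_rules"]),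
--     ],
--     "create_scenario": _SCENARIO_RULES,
--     "explain_scenario": _SCENARIO_RULES,
--     "goal_planning": [
--         ((), "best_practice_categories", ["runway_extension"]),
--         ((), "how_to_topics", ["extend_runway"]),
--     ],
--     "check_runway": [
--         ((), "glossary_terms", ["runway", "burn_rate"]),
--         ((), "features", ["runway_tracking"]),
--     ],
--     "check_cash": [
--         ((), "glossary_terms", ["cash_position", "opening_balance"]),
--         ((), "features", ["cash_tracking"]),
--     ],
--     "help": [
--         ((), "features", ["tami_assistant"]),
--         ((), "situations", ["first_time_user"]),
--     ],
-- }
--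
-- _CATEGORIES = ("glossary_terms", "scenario_types", "best_practice_categories",
--                "features", "how_to_topics", "situations")
--
--
-- def get_relevant_knowledge_keys(intent, keywords):
--     keys = {c: [] for c in _CATEGORIES}
--     if intent == "explain_term":
--         keys["glossary_terms"] = keywords if keywords else []
--         return keys
--     text = " ".join(keywords).lower()
--     for triggers, category, values in _RULES.get(intent, []):
--         if not triggers or any(w in text for w in triggers):
--             keys[category].extend(values)
--     return keys
-- ===== Notes on version B (the rewrite author's own statement) =====
-- stated objective: simpler
-- what changed: The if/elif chain of hand-written branches is replaced by a declarative rules table (intent -> list of (trigger_words, category, values)) scanned by one uniform loop, with explain_term as the single remaining special case.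
import Mathlib
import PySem

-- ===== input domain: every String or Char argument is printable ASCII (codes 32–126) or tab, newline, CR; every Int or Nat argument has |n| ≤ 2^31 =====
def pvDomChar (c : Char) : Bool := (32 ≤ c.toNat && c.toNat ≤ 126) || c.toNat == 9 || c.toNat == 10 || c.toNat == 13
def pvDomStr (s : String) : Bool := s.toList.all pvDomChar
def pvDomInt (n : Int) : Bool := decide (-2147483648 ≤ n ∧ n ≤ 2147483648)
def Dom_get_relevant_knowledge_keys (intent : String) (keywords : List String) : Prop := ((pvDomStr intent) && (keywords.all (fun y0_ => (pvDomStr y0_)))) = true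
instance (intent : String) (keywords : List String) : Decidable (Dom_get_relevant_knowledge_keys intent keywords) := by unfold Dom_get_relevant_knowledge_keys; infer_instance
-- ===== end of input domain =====

-- B replaces A's if/elif chain by a rules table scanned uniformly (objective: simpler).

-- ===== PORT A =====
def get_relevant_knowledge_keys (intent : String) (keywords : List String) : List (String × List String) :=
  let keys : PySem.Dict String (List String) := PySem.Dict.mk
    [("glossary_terms", []), ("scenario_types", []), ("best_practice_categories", []),
     ("features", []), ("how_to_topics", []), ("situations", [])]
  let keys :=
    if intent == "explain_term" then
      keys.insert "glossary_terms" (if keywords != [] then keywords else [])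
    else if intent == "how_to" then
      let keyword_str := PySem.Str.lower (PySem.Str.join " " keywords)
      let keys := if PySem.Str.isIn "client" keyword_str || PySem.Str.isIn "customer" keyword_str then
        keys.modify "how_to_topics" [] (· ++ ["add_client"]) else keys
      let keys := if PySem.Str.isIn "expense" keyword_str || PySem.Str.isIn "cost" keyword_str then
        keys.modify "how_to_topics" [] (· ++ ["add_expense"]) else keys
      let keys := if PySem.Str.isIn "scenario" keyword_str then
        keys.modify "how_to_topics" [] (· ++ ["create_scenario"]) else keys
      let keys := if PySem.Str.isIn "forecast" keyword_str then
        keys.modify "how_to_topics" [] (· ++ ["interpret_forecast"]) else keys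
      let keys := if PySem.Str.isIn "xero" keyword_str then
        keys.modify "how_to_topics" [] (· ++ ["connect_xero"]) else keys
      keys
    else if intent == "explain_risk" then
      (keys.modify "best_practice_categories" [] (· ++ ["risk_management"])).modify "features" [] (· ++ ["buffer_rules"])
    else if intent == "create_scenario" || intent == "explain_scenario" then
      let keyword_str := PySem.Str.lower (PySem.Str.join " " keywords)
      let keys := if ["client", "customer", "churn", "lose", "loss"].any (fun w => PySem.Str.isIn w keyword_str) then
        keys.modify "scenario_types" [] (· ++ ["client_loss"]) else keys
      let keys := if ["hire", "staff", "employee", "team"].any (fun w => PySem.Str.isIn w keyword_str) then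
        keys.modify "scenario_types" [] (· ++ ["new_hire"]) else keys
      let keys := if ["delay", "late", "payment"].any (fun w => PySem.Str.isIn w keyword_str) then
        keys.modify "scenario_types" [] (· ++ ["payment_delay"]) else keys
      let keys := if ["expense", "cut", "reduce", "cost"].any (fun w => PySem.Str.isIn w keyword_str) then
        keys.modify "scenario_types" [] (· ++ ["expense_adjustment"]) else keys
      keys
    else if intent == "goal_planning" then
      (keys.modify "best_practice_categories" [] (· ++ ["runway_extension"])).modify "how_to_topics" [] (· ++ ["extend_runway"])
    else if intent == "check_runway" then
      (keys.modify "glossary_terms" [] (· ++ ["runway", "burn_rate"])).modify "features" [] (· ++ ["runway_tracking"])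
    else if intent == "check_cash" then
      (keys.modify "glossary_terms" [] (· ++ ["cash_position", "opening_balance"])).modify "features" [] (· ++ ["cash_tracking"])
    else if intent == "help" then
      (keys.modify "features" [] (· ++ ["tami_assistant"])).modify "situations" [] (· ++ ["first_time_user"])
    else keys
  keys.items

-- ===== PORT B =====
def pvScenarioRules : List (List String × String × List String) :=
  [(["client", "customer", "churn", "lose", "loss"], "scenario_types", ["client_loss"]),
   (["hire", "staff", "employee", "team"], "scenario_types", ["new_hire"]),
   (["delay", "late", "payment"], "scenario_types", ["payment_delay"]),
   (["expense", "cut", "reduce", "cost"], "scenario_types", ["expense_adjustment"])]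

def pvRules : PySem.Dict String (List (List String × String × List String)) := PySem.Dict.mk
  [("how_to",
     [(["client", "customer"], "how_to_topics", ["add_client"]),
      (["expense", "cost"], "how_to_topics", ["add_expense"]),
      (["scenario"], "how_to_topics", ["create_scenario"]),
      (["forecast"], "how_to_topics", ["interpret_forecast"]),
      (["xero"], "how_to_topics", ["connect_xero"])]),
   ("explain_risk",
     [([], "best_practice_categories", ["risk_management"]),
      ([], "features", ["buffer_rules"])]),
   ("create_scenario", pvScenarioRules),
   ("explain_scenario", pvScenarioRules),
   ("goal_planning",
     [([], "best_practice_categories", ["runway_extension"]),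
      ([], "how_to_topics", ["extend_runway"])]),
   ("check_runway",
     [([], "glossary_terms", ["runway", "burn_rate"]),
      ([], "features", ["runway_tracking"])]),
   ("check_cash",
     [([], "glossary_terms", ["cash_position", "opening_balance"]),
      ([], "features", ["cash_tracking"])]),
   ("help",
     [([], "features", ["tami_assistant"]),
      ([], "situations", ["first_time_user"])])]

def pvCategories : List String :=
  ["glossary_terms", "scenario_types", "best_practice_categories", "features", "how_to_topics", "situations"]

def get_relevant_knowledge_keys_alt (intent : String) (keywords : List String) : List (String × List String) :=
  let keys : PySem.Dict String (List String) := PySem.Dict.mk (pvCategories.map (fun c => (c, [])))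
  if intent == "explain_term" then
    (keys.insert "glossary_terms" (if keywords != [] then keywords else [])).items
  else
    let text := PySem.Str.lower (PySem.Str.join " " keywords)
    ((pvRules.getD intent []).foldl (fun d r =>
        if r.1 == [] || r.1.any (fun w => PySem.Str.isIn w text) then
          d.modify r.2.1 [] (· ++ r.2.2)
        else d) keys).items

-- ===== PRECONDITION & SPEC =====
def Spec_get_relevant_knowledge_keys (intent : String) (keywords : List String) (out : List (String × List String)) : Prop := out = get_relevant_knowledge_keys_alt intent keywords
instance (intent : String) (keywords : List String) (out : List (String × List String)) : Decidable (Spec_get_relevant_knowledge_keys intent keywords out) := by unfold Spec_get_relevant_knowledge_keys; infer_instance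

-- ===== CLAIM (what is proved, stated in full; the proofs are below) =====
def Claim_equal_get_relevant_knowledge_keys : Prop := ∀ (intent : String) (keywords : List String), Dom_get_relevant_knowledge_keys intent keywords → Spec_get_relevant_knowledge_keys intent keywords (get_relevant_knowledge_keys intent keywords)

-- ===== LEMMAS AND PROOFS =====

-- ===== VERDICT (by name: the statement is the Claim_ definition above) =====
theorem get_relevant_knowledge_keys_spec : Claim_equal_get_relevant_knowledge_keys := by
  intro intent keywords _
  unfold Spec_get_relevant_knowledge_keys get_relevant_knowledge_keys get_relevant_knowledge_keys_alt
  by_cases h1 : intent = "explain_term"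
  · subst h1; rfl
  by_cases h2 : intent = "how_to"
  · subst h2; simp [pvRules, pvCategories, PySem.Dict.getD, PySem.Dict.get?, List.foldl]
  by_cases h3 : intent = "explain_risk"
  · subst h3; simp [pvRules, pvCategories, PySem.Dict.getD, PySem.Dict.get?, List.foldl]
  by_cases h4 : intent = "create_scenario"
  · subst h4; simp [pvRules, pvScenarioRules, pvCategories, PySem.Dict.getD, PySem.Dict.get?, List.foldl]
  by_cases h5 : intent = "explain_scenario"
  · subst h5; simp [pvRules, pvScenarioRules, pvCategories, PySem.Dict.getD, PySem.Dict.get?, List.foldl]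
  by_cases h6 : intent = "goal_planning"
  · subst h6; simp [pvRules, pvCategories, PySem.Dict.getD, PySem.Dict.get?, List.foldl]
  by_cases h7 : intent = "check_runway"
  · subst h7; simp [pvRules, pvCategories, PySem.Dict.getD, PySem.Dict.get?, List.foldl]
  by_cases h8 : intent = "check_cash"
  · subst h8; simp [pvRules, pvCategories, PySem.Dict.getD, PySem.Dict.get?, List.foldl]
  by_cases h9 : intent = "help"
  · subst h9; simp [pvRules, pvCategories, PySem.Dict.getD, PySem.Dict.get?, List.foldl]
  have e : ∀ k : String, ¬ intent = k → (k == intent) = false := by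
    intro k hk
    simp only [beq_eq_false_iff_ne, ne_eq]
    exact fun h => hk h.symm
  simp [pvRules, pvCategories, PySem.Dict.getD, PySem.Dict.get?, List.find?, h1,
    h2, h3, h4, h5, h6, h7, h8, h9, e _ h2, e _ h3, e _ h4, e _ h5, e _ h6, e _ h7, e _ h8, e _ h9]
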